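-- pv_equiv track=rewrite | github.com/tambdev/nltk-america | programma1.py | vocCum
-- ===== SOURCE A (Python) =====
-- def vocCum(t):
--     n = 1000
--     l=[]
--
--     while n < len(t): #Creo una lista di tuple
--         l.append((n, len(set(t[:n]))))
--         n+=1000
--
--     l.append((len(t),len(set(t)))) #Valore finale della distribuzione
--     return l
-- ===== SOURCE B (Python) =====
-- def vocCum(t):
--     # one pass: record the index of each token's FIRST occurrence; since these
--     # indices are increasing, the vocabulary size within the first n tokens is
--     # the number of first-occurrence indices < n, found by binary search.
--     seen = set()
--     firsts = []
--     for i, w in enumerate(t):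
--         if w not in seen:
--             seen.add(w)
--             firsts.append(i)
--
--     def bl(a, x):  # bisect_left (hand-written: this module imports nothing)
--         lo, hi = 0, len(a)
--         while lo < hi:
--             mid = (lo + hi) // 2
--             if a[mid] < x:
--                 lo = mid + 1
--             else:
--                 hi = mid
--         return lo
--
--     out = []
--     n = 1000
--     while n < len(t):
--         out.append((n, bl(firsts, n)))
--         n += 1000
--     out.append((len(t), bl(firsts, len(t))))
--     return out
-- ===== Notes on version B (the rewrite author's own statement) =====
-- stated objective: faster
-- what changed: Replaces the repeated len(set(t[:n])) prefix scans with a single pass that records each token's first-occurrence index, answering every cumulative-vocabulary query by binary search (bisect_left) on that sorted index list.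
import Mathlib
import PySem

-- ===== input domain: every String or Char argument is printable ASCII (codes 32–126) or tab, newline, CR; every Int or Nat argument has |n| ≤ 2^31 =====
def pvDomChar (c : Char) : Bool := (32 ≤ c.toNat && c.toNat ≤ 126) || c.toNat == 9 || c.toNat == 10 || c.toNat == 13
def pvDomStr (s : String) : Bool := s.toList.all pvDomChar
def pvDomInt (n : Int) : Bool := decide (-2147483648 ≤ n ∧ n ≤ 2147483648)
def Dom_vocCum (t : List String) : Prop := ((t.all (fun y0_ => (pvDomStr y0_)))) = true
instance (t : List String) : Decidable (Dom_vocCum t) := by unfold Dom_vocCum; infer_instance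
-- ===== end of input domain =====

-- B replaces A's repeated `len(set(t[:n]))` prefix scans by one pass recording
-- first-occurrence indices plus binary-search (bisect_left) queries on them.

-- ===== PORT A =====
-- the `while n < len(t): l.append((n, len(set(t[:n])))); n += 1000` loop
def vocCumLoopA (t : List String) (n : Nat) (l : List (Int × Int)) : List (Int × Int) :=
  if n < t.length then
    vocCumLoopA t (n + 1000)
      (l ++ [((n : Int), ((PySem.Set.ofList (PySem.List.slice t none (some (n : Int)))).length : Int))])
  else l
termination_by t.length - n
decreasing_by omega

def vocCum (t : List String) : List (Int × Int) :=
  vocCumLoopA t 1000 [] ++ [((t.length : Int), ((PySem.Set.ofList t).length : Int))]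

-- ===== PORT B =====
-- the `for i, w in enumerate(t): if w not in seen: seen.add(w); firsts.append(i)` pass
def bFirsts : List String → Int → PySem.Set String → List Int
  | [], _, _ => []
  | w :: ws, i, seen =>
    if PySem.Set.contains seen w then bFirsts ws (i + 1) seen
    else i :: bFirsts ws (i + 1) (PySem.Set.add seen w)

-- the `while n < len(t): out.append((n, bl(firsts, n))); n += 1000` loop
-- (Source B's hand-written `bl` is CPython's bisect_left loop = PySem.List.bisectLeft)
def vocCumLoopB (firsts : List Int) (L : Nat) (n : Nat) (out : List (Int × Int)) : List (Int × Int) :=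
  if n < L then
    vocCumLoopB firsts L (n + 1000)
      (out ++ [((n : Int), (PySem.List.bisectLeft firsts (n : Int) : Int))])
  else out
termination_by L - n
decreasing_by omega

def vocCum_alt (t : List String) : List (Int × Int) :=
  let firsts := bFirsts t 0 PySem.Set.empty
  vocCumLoopB firsts t.length 1000 []
    ++ [((t.length : Int), (PySem.List.bisectLeft firsts (t.length : Int) : Int))]

-- ===== PRECONDITION & SPEC =====
def Spec_vocCum (t : List String) (out : List (Int × Int)) : Prop := out = vocCum_alt t
instance (t : List String) (out : List (Int × Int)) : Decidable (Spec_vocCum t out) := by unfold Spec_vocCum; infer_instance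

-- ===== CLAIM (what is proved, stated in full; the proofs are below) =====
def Claim_equal_vocCum : Prop := ∀ (t : List String), Dom_vocCum t → Spec_vocCum t (vocCum t)

-- ===== LEMMAS AND PROOFS =====

-- every index produced by bFirsts is ≥ the starting index
lemma bFirsts_ge : ∀ (ws : List String) (i : Int) (seen : PySem.Set String) (v : Int),
    v ∈ bFirsts ws i seen → i ≤ v := by
  intro ws
  induction ws with
  | nil => intro i seen v hv; simp [bFirsts] at hv
  | cons w ws ih =>
    intro i seen v hv
    simp only [bFirsts] at hv
    split at hv
    · have := ih (i + 1) seen v hv; omega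
    · rcases List.mem_cons.mp hv with h | h
      · omega
      · have := ih (i + 1) _ v h; omega

-- bFirsts is weakly increasing
lemma bFirsts_pairwise : ∀ (ws : List String) (i : Int) (seen : PySem.Set String),
    (bFirsts ws i seen).Pairwise (fun a b => a ≤ b) := by
  intro ws
  induction ws with
  | nil => intro i seen; simp [bFirsts]
  | cons w ws ih =>
    intro i seen
    simp only [bFirsts]
    split
    · exact ih (i + 1) seen
    · refine List.Pairwise.cons ?_ (ih (i + 1) _)
      intro v hv
      have := bFirsts_ge ws (i + 1) _ v hv; omega

-- count of first-occurrence indices below i+n = #distinct among the next n tokens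
lemma bFirsts_countP : ∀ (ws : List String) (n : Nat) (i : Int) (seen : PySem.Set String),
    (bFirsts ws i seen).countP (fun v => decide (v < i + (n : Int))) + seen.length
      = (List.foldl PySem.Set.add seen (ws.take n)).length := by
  intro ws
  induction ws with
  | nil => intro n i seen; simp [bFirsts]
  | cons w ws ih =>
    intro n i seen
    cases n with
    | zero =>
      have hz : (bFirsts (w :: ws) i seen).countP (fun v => decide (v < i + ((0 : Nat) : Int))) = 0 := by
        rw [List.countP_eq_zero]
        intro v hv
        have h1 := bFirsts_ge (w :: ws) i seen v hv
        simp only [Nat.cast_zero, add_zero, decide_eq_true_eq]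
        omega
      simp only [List.take_zero, List.foldl_nil]
      rw [hz]
      omega
    | succ m =>
      simp only [bFirsts, List.take_succ_cons, List.foldl_cons]
      have harith : i + ((m + 1 : Nat) : Int) = (i + 1) + (m : Int) := by push_cast; ring
      by_cases hc : PySem.Set.contains seen w = true
      · have hadd : PySem.Set.add seen w = seen := by
          unfold PySem.Set.add
          rw [if_pos hc]
        rw [if_pos hc, hadd, harith]
        exact ih m (i + 1) seen
      · have hlen : (PySem.Set.add seen w).length = seen.length + 1 := by
          unfold PySem.Set.add
          rw [if_neg hc]
          simp
        have h2 := ih m (i + 1) (PySem.Set.add seen w)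
        rw [hlen] at h2
        rw [if_neg hc]
        rw [List.countP_cons_of_pos (p := fun v => decide (v < i + ((m + 1 : Nat) : Int)))
          (by simp only [decide_eq_true_eq]; omega)]
        rw [harith]
        omega

-- a list split by an index r (all < x strictly before r, all ≥ x from r on) has countP (< x) = r
lemma countP_eq_of_split (x : Int) : ∀ (a : List Int) (r : Nat), r ≤ a.length →
    (∀ (j : Nat) (hj : j < a.length), j < r → a[j] < x) →
    (∀ (j : Nat) (hj : j < a.length), r ≤ j → x ≤ a[j]) →
    a.countP (fun v => decide (v < x)) = r := by
  intro a
  induction a with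
  | nil =>
    intro r hr _ _
    simp only [List.length_nil, Nat.le_zero] at hr
    subst hr
    simp
  | cons h tl ih =>
    intro r hr hlt hge
    cases r with
    | zero =>
      apply List.countP_eq_zero.mpr
      intro v hv
      rcases List.mem_iff_getElem.mp hv with ⟨j, hj, rfl⟩
      have := hge j hj (Nat.zero_le j)
      simp; omega
    | succ s =>
      have hh : h < x := by
        have := hlt 0 (by simp) (Nat.succ_pos s)
        simpa using this
      rw [List.countP_cons_of_pos (p := fun v => decide (v < x)) (by simpa using hh)]
      have := ih s (by simpa using hr)
        (fun j hj hjs => by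
          have := hlt (j + 1) (by simpa using Nat.succ_lt_succ hj) (Nat.succ_lt_succ hjs)
          simpa using this)
        (fun j hj hjs => by
          have := hge (j + 1) (by simpa using Nat.succ_lt_succ hj) (Nat.succ_le_succ hjs)
          simpa using this)
      omega

-- per-checkpoint value: the bisect query equals A's prefix-set size
lemma entry_eq (t : List String) (n : Nat) :
    (PySem.List.bisectLeft (bFirsts t 0 PySem.Set.empty) ((n : Nat) : Int) : Nat)
      = (PySem.Set.ofList (t.take n)).length := by
  set a := bFirsts t 0 PySem.Set.empty with ha
  obtain ⟨hle, hlt, hge⟩ := PySem.List.bisectLeft_spec a ((n : Nat) : Int)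
    (bFirsts_pairwise t 0 PySem.Set.empty)
  have hcount := countP_eq_of_split ((n : Nat) : Int) a _ hle
    (fun j hj hjr => hlt j hj hjr) (fun j hj hjr => hge j hj hjr)
  have hfold := bFirsts_countP t n 0 PySem.Set.empty
  simp only [PySem.Set.empty, List.length_nil, Nat.add_zero, Int.zero_add] at hfold
  rw [← hcount]
  exact hfold

lemma loop_eq (t : List String) (n : Nat) (l : List (Int × Int)) :
    vocCumLoopA t n l = vocCumLoopB (bFirsts t 0 PySem.Set.empty) t.length n l := by
  fun_induction vocCumLoopA t n l with
  | case1 n l h ih =>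
    have hval : ((PySem.Set.ofList (PySem.List.slice t none (some (n : Int)))).length : Int)
        = (PySem.List.bisectLeft (bFirsts t 0 PySem.Set.empty) ((n : Nat) : Int) : Int) := by
      rw [PySem.List.slice_to_natCast]
      exact_mod_cast (entry_eq t n).symm
    rw [vocCumLoopB, if_pos h, ih, hval]
  | case2 n l h =>
    rw [vocCumLoopB, if_neg h]

-- ===== VERDICT (by name: the statement is the Claim_ definition above) =====
theorem vocCum_spec : Claim_equal_vocCum := by
  intro t _
  unfold Spec_vocCum vocCum vocCum_alt
  rw [loop_eq]
  have hval : ((PySem.Set.ofList t).length : Int)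
      = (PySem.List.bisectLeft (bFirsts t 0 PySem.Set.empty) ((t.length : Nat) : Int) : Int) := by
    have := entry_eq t t.length
    rw [List.take_length] at this
    exact_mod_cast this.symm
  rw [hval]
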